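-- pv_equiv track=rewrite | github.com/Ananya8576/n-pieces-goal-finding | CSP.py | pieces_dict
-- ===== SOURCE A (Python) =====
-- def available_pieces_vars(num_pieces): #dictionary to map every piece and the no. of those pieces
--     board_vars={}
--     p=['King','Queen','Bishop','Rook','Knight','Ferz','Princess','Empress']
--     for i,j in zip(num_pieces,p):
--         if i>0:
--             board_vars[j]=i
--         else:
--             continue
--     #available_pieces = [key for key, value in board_vars.items() for _ in range(value)]
--     return board_vars
--
-- def pieces_dict(num_pieces,grid): #dictionary to map every piece and initial domain
--     dict={}
--     lst=list(available_pieces_vars(num_pieces).keys())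
--     p=['King','Queen','Bishop','Rook','Knight','Ferz','Princess','Empress']
--     for i,j in zip(num_pieces,p):
--         if i>0:
--             dict[j]=[]
--     for k in lst:
--         for r in range(len(grid)):
--             for c in range(len(grid[0])):
--                 if grid[r][c]!=-1:
--                     dict[k].append((0,0,(r,c)))
--                 else:
--                     continue
--     return dict
-- ===== SOURCE B (Python) =====
-- def pieces_dict(num_pieces, grid):
--     p = ['King', 'Queen', 'Bishop', 'Rook', 'Knight', 'Ferz', 'Princess', 'Empress']
--     active = [name for n, name in zip(num_pieces, p) if n > 0]
--     if not active:
--         return {}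
--     w = len(grid[0]) if grid else 0
--     positions = [(0, 0, (r, c)) for r in range(len(grid)) for c in range(w)
--                  if grid[r][c] != -1]
--     return {name: list(positions) for name in active}
-- ===== Notes on version B (the rewrite author's own statement) =====
-- stated objective: faster
-- what changed: B scans the grid once to build a single position table and assigns each active piece a copy of it, instead of A's rescanning the whole grid (three nested loops) once per active piece.
import Mathlib
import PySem

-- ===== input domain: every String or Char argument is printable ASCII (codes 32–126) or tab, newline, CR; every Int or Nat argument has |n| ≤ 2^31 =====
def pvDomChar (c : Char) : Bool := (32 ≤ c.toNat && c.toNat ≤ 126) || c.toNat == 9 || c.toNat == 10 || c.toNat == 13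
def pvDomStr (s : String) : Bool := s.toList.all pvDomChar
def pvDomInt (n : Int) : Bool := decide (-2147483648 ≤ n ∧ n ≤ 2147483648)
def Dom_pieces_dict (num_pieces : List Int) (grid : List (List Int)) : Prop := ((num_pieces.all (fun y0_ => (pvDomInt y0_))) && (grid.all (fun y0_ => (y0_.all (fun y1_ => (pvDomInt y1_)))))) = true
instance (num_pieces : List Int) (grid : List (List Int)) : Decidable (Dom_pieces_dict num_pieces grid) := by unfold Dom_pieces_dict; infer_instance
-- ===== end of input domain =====

-- B replaces A's per-piece rescanning of the grid with a build-once position table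
-- assigned to each active piece (objective: faster, constant-factor — one grid scan
-- instead of one per active piece).

def pieceNames : List String :=
  ["King", "Queen", "Bishop", "Rook", "Knight", "Ferz", "Princess", "Empress"]

-- ===== PORT A =====
def available_pieces_vars (num_pieces : List Int) : PySem.Dict String Int :=
  (num_pieces.zip pieceNames).foldl
    (fun d ij => if ij.1 > 0 then d.insert ij.2 ij.1 else d) PySem.Dict.empty

def pieces_dict (num_pieces : List Int) (grid : List (List Int)) : List (String × List (Int × Int × (Int × Int))) :=
  let lst := (available_pieces_vars num_pieces).keys
  let d0 : PySem.Dict String (List (Int × Int × (Int × Int))) :=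
    (num_pieces.zip pieceNames).foldl
      (fun d ij => if ij.1 > 0 then d.insert ij.2 [] else d) PySem.Dict.empty
  (lst.foldl (fun d k =>
    (PySem.List.pyRange 0 (grid.length : Int) 1).foldl (fun d r =>
      (PySem.List.pyRange 0 (((PySem.List.pyGet? grid 0).getD []).length : Int) 1).foldl (fun d c =>
        -- grid[r][c]: Python raises on a short row; Pre_ excludes that, getD (-1) skips
        if ((PySem.List.pyGet? ((PySem.List.pyGet? grid r).getD []) c).getD (-1)) ≠ -1 then
          d.modify k [] (fun xs => xs ++ [((0 : Int), (0 : Int), (r, c))])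
        else d) d) d) d0).items

-- ===== PORT B =====
def pieces_dict_alt (num_pieces : List Int) (grid : List (List Int)) : List (String × List (Int × Int × (Int × Int))) :=
  let active := ((num_pieces.zip pieceNames).filter (fun ij => ij.1 > 0)).map (·.2)
  if active = [] then []
  else
    let w : Int := if grid = [] then 0 else ((grid.headD []).length : Int)
    let positions : List (Int × Int × (Int × Int)) :=
      (PySem.List.pyRange 0 (grid.length : Int) 1).flatMap (fun r =>
        ((PySem.List.pyRange 0 w 1).filter (fun c =>
            ((PySem.List.pyGet? ((PySem.List.pyGet? grid r).getD []) c).getD (-1)) ≠ -1)).map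
          (fun c => ((0 : Int), (0 : Int), (r, c))))
    active.map (fun name => (name, positions))

-- ===== PRECONDITION & SPEC =====
-- Pre_ excludes exactly the ragged grids (a row shorter than row 0) on which, when some
-- piece count is positive, both Pythons raise IndexError at grid[r][c].
def Pre_pieces_dict (num_pieces : List Int) (grid : List (List Int)) : Prop :=
  ((num_pieces.zip pieceNames).filter (fun ij => ij.1 > 0)).map (·.2) = [] ∨
    ∀ row ∈ grid, (grid.headD []).length ≤ row.length
instance (num_pieces : List Int) (grid : List (List Int)) : Decidable (Pre_pieces_dict num_pieces grid) := by unfold Pre_pieces_dict; infer_instance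

def pvWitness_pieces_dict : List Int × List (List Int) := ([1, 0, 2], [[0, -1], [3, 4]])

def Spec_pieces_dict (num_pieces : List Int) (grid : List (List Int)) (out : List (String × List (Int × Int × (Int × Int)))) : Prop := out = pieces_dict_alt num_pieces grid
instance (num_pieces : List Int) (grid : List (List Int)) (out : List (String × List (Int × Int × (Int × Int)))) : Decidable (Spec_pieces_dict num_pieces grid out) := by unfold Spec_pieces_dict; infer_instance

-- ===== CLAIM (what is proved, stated in full; the proofs are below) =====
def Claim_equal_pieces_dict : Prop := ∀ (num_pieces : List Int) (grid : List (List Int)), Dom_pieces_dict num_pieces grid → Pre_pieces_dict num_pieces grid → Spec_pieces_dict num_pieces grid (pieces_dict num_pieces grid)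

-- ===== LEMMAS AND PROOFS =====

-- a conditional-append loop is a fold over the filtered list
theorem foldl_ite_filter {α δ : Type} (l : List α) (p : α → Prop) [DecidablePred p]
    (f : δ → α → δ) (d : δ) :
    l.foldl (fun d x => if p x then f d x else d) d
      = (l.filter (fun x => decide (p x))).foldl f d := by
  induction l generalizing d with
  | nil => rfl
  | cons x l ih => by_cases h : p x <;> simp [h, ih]

theorem map_snd_zip_sublist (a : List Int) (b : List String) :
    List.Sublist ((a.zip b).map Prod.snd) b := by
  induction a generalizing b with
  | nil => simp
  | cons x xs ih => cases b with
    | nil => simp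
    | cons y ys => simpa using List.Sublist.cons₂ y (ih ys)

theorem modify_id {ν : Type} (d : PySem.Dict String ν) (k : String) (d0 : ν)
    (h : d.contains k = true) (hnd : d.keys.Nodup) :
    d.modify k d0 (fun v => v) = d := by
  apply PySem.Dict.ext
  rw [PySem.Dict.modify, PySem.Dict.items_insert_of_contains d _ h]
  conv_rhs => rw [← List.map_id d.items]
  apply List.map_congr_left
  intro p hp
  by_cases hk : p.1 = k
  · have h2 : d.getD p.1 d0 = p.2 := PySem.Dict.getD_of_mem_items d (by exact hp) hnd d0
    simp [hk] at h2 ⊢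
    rw [h2, ← hk]
  · simp [hk]

theorem modify_modify {ν : Type} (d : PySem.Dict String ν) (k : String) (d0 : ν) (g h : ν → ν) :
    (d.modify k d0 g).modify k d0 h = d.modify k d0 (fun v => h (g v)) := by
  simp [PySem.Dict.modify, PySem.Dict.getD_insert_self, PySem.Dict.insert_insert_self]

theorem keys_modify_of_contains {ν : Type} (d : PySem.Dict String ν) (k : String) (d0 : ν)
    (f : ν → ν) (h : d.contains k = true) : (d.modify k d0 f).keys = d.keys := by
  rw [PySem.Dict.keys_modify, PySem.Dict.keys_insert_of_contains d _ h]

-- the innermost column loop appends the filtered row positions to key k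
theorem fold_if_modify_append {α β : Type} (L : List α) (p : α → Prop) [DecidablePred p]
    (e : α → β) (k : String) (d : PySem.Dict String (List β))
    (h : d.contains k = true) (hnd : d.keys.Nodup) :
    L.foldl (fun d x => if p x then d.modify k [] (fun xs => xs ++ [e x]) else d) d
      = d.modify k [] (fun xs => xs ++ (L.filter (fun x => decide (p x))).map e) := by
  induction L generalizing d with
  | nil =>
    have : (fun xs : List β => xs ++ (([] : List α).filter (fun x => decide (p x))).map e)
        = fun v : List β => v := by funext xs; simp
    rw [this, modify_id d k [] h hnd]
    rfl
  | cons x L ih =>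
    simp only [List.foldl_cons, List.filter_cons]
    by_cases hq : p x
    · rw [if_pos hq,
        ih _ (by simp [PySem.Dict.contains_modify, h])
             (by rw [keys_modify_of_contains _ _ _ _ h]; exact hnd),
        modify_modify]
      simp [hq]
    · rw [if_neg hq, ih d h hnd]
      simp [hq]

-- the row/column double loop appends the whole position table to key k
theorem fold2_modify {α γ β : Type} (R : List α) (C : List γ) (p : α → γ → Prop)
    [∀ r c, Decidable (p r c)] (e : α → γ → β) (k : String) (d : PySem.Dict String (List β))
    (h : d.contains k = true) (hnd : d.keys.Nodup) :
    R.foldl (fun d r =>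
        C.foldl (fun d c => if p r c then d.modify k [] (fun xs => xs ++ [e r c]) else d) d) d
      = d.modify k []
          (fun xs => xs ++ R.flatMap (fun r => (C.filter (fun c => decide (p r c))).map (e r))) := by
  induction R generalizing d with
  | nil =>
    have : (fun xs : List β =>
        xs ++ ([] : List α).flatMap (fun r => (C.filter (fun c => decide (p r c))).map (e r)))
        = fun v : List β => v := by funext xs; simp
    rw [this, modify_id d k [] h hnd]
    rfl
  | cons r R ih =>
    simp only [List.foldl_cons]
    rw [fold_if_modify_append C (p r) (e r) k d h hnd,
      ih _ (by simp [PySem.Dict.contains_modify, h])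
           (by rw [keys_modify_of_contains _ _ _ _ h]; exact hnd),
      modify_modify]
    congr 1
    funext xs
    simp

-- the outer per-piece loop: keys are unchanged and each processed key receives POS
theorem fold_outer {α γ β : Type} (R : List α) (C : List γ) (p : α → γ → Prop)
    [∀ r c, Decidable (p r c)] (e : α → γ → β) (ks : List String)
    (d : PySem.Dict String (List β)) (hnd : d.keys.Nodup)
    (hks : ∀ k ∈ ks, d.contains k = true) (hn : ks.Nodup) :
    ((ks.foldl (fun d k => R.foldl (fun d r =>
        C.foldl (fun d c => if p r c then d.modify k [] (fun xs => xs ++ [e r c]) else d) d) d) d).keys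
        = d.keys) ∧
    (∀ j : String, (ks.foldl (fun d k => R.foldl (fun d r =>
        C.foldl (fun d c => if p r c then d.modify k [] (fun xs => xs ++ [e r c]) else d) d) d) d).getD j []
      = if j ∈ ks then
          d.getD j [] ++ R.flatMap (fun r => (C.filter (fun c => decide (p r c))).map (e r))
        else d.getD j []) := by
  induction ks generalizing d with
  | nil => simp
  | cons k ks ih =>
    have hk : d.contains k = true := hks k (List.mem_cons_self)
    have hbody : R.foldl (fun d r =>
        C.foldl (fun d c => if p r c then d.modify k [] (fun xs => xs ++ [e r c]) else d) d) d
        = d.modify k []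
            (fun xs => xs ++ R.flatMap (fun r => (C.filter (fun c => decide (p r c))).map (e r))) :=
      fold2_modify R C p e k d hk hnd
    have hknotin : k ∉ ks := (List.nodup_cons.mp hn).1
    have hnd' : (d.modify k []
        (fun xs => xs ++ R.flatMap (fun r => (C.filter (fun c => decide (p r c))).map (e r)))).keys.Nodup := by
      rw [keys_modify_of_contains _ _ _ _ hk]; exact hnd
    have hks' : ∀ k' ∈ ks, (d.modify k []
        (fun xs => xs ++ R.flatMap (fun r => (C.filter (fun c => decide (p r c))).map (e r)))).contains k' = true := by
      intro k' hk'
      simp [PySem.Dict.contains_modify, hks k' (List.mem_cons_of_mem _ hk')]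
    obtain ⟨ihk, ihg⟩ := ih _ hnd' hks' (List.nodup_cons.mp hn).2
    simp only [List.foldl_cons, hbody]
    constructor
    · rw [ihk, keys_modify_of_contains _ _ _ _ hk]
    · intro j
      rw [ihg j]
      by_cases hjks : j ∈ ks
      · have hjk : j ≠ k := fun h => hknotin (h ▸ hjks)
        rw [if_pos hjks, if_pos (List.mem_cons_of_mem _ hjks),
          PySem.Dict.getD_modify_of_ne d [] _ hjk]
      · rw [if_neg hjks]
        by_cases hjk : j = k
        · subst hjk
          rw [if_pos List.mem_cons_self, PySem.Dict.getD_modify_self]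
        · rw [if_neg (by simp [hjk, hjks]), PySem.Dict.getD_modify_of_ne d [] _ hjk]
def posTable (grid : List (List Int)) : List (Int × Int × (Int × Int)) :=
  (PySem.List.pyRange 0 (grid.length : Int) 1).flatMap (fun r =>
    ((PySem.List.pyRange 0 (((PySem.List.pyGet? grid 0).getD []).length : Int) 1).filter
      (fun c => decide ((PySem.List.pyGet? ((PySem.List.pyGet? grid r).getD []) c).getD (-1) ≠ -1))).map
      (fun c => ((0 : Int), (0 : Int), (r, c))))

theorem main_items (fil : List (Int × String)) (hnd : (fil.map Prod.snd).Nodup)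
    (grid : List (List Int)) :
    (List.foldl
        (fun d k =>
          List.foldl
            (fun d r =>
              List.foldl
                (fun d c =>
                  if (PySem.List.pyGet? ((PySem.List.pyGet? grid r).getD []) c).getD (-1) ≠ -1 then
                    d.modify k [] fun xs => xs ++ [((0 : Int), (0 : Int), (r, c))]
                  else d)
                d (PySem.List.pyRange 0 ((((PySem.List.pyGet? grid 0).getD []).length : Nat) : Int)))
            d (PySem.List.pyRange 0 ((grid.length : Nat) : Int)))
        (List.foldl (fun d ij => d.insert ij.2 ([] : List (Int × Int × (Int × Int)))) PySem.Dict.empty fil)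
        (List.foldl (fun d ij => d.insert ij.2 ij.1) PySem.Dict.empty fil).keys).items
      = List.map (fun x => (x.2, posTable grid)) fil := by
  have hkeys1 : (List.foldl (fun d ij => d.insert ij.2 ij.1) PySem.Dict.empty fil).keys
      = fil.map Prod.snd := by
    rw [PySem.Dict.keys_foldl_insert_key fil (fun ij => ij.2) (fun _ ij => ij.1) PySem.Dict.empty,
      PySem.Dict.keys_empty, PySem.Set.update_nil_left,
      PySem.Set.ofList_eq_self_of_nodup _ hnd]
  have hitems0 : (List.foldl (fun d ij => d.insert ij.2 ([] : List (Int × Int × (Int × Int)))) PySem.Dict.empty fil).items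
      = fil.map (fun ij => (ij.2, ([] : List (Int × Int × (Int × Int))))) := by
    rw [PySem.Dict.items_foldl_insert_fresh fil (fun ij => ij.2) (fun _ => []) PySem.Dict.empty
      (fun a _ => PySem.Dict.contains_empty _) hnd]
    simp [PySem.Dict.empty]
  have hkeys0 : (List.foldl (fun d ij => d.insert ij.2 ([] : List (Int × Int × (Int × Int)))) PySem.Dict.empty fil).keys
      = fil.map Prod.snd := by
    rw [PySem.Dict.keys_foldl_insert_key fil (fun ij => ij.2) (fun _ _ => []) PySem.Dict.empty,
      PySem.Dict.keys_empty, PySem.Set.update_nil_left,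
      PySem.Set.ofList_eq_self_of_nodup _ hnd]
  have hnd0 : (List.foldl (fun d ij => d.insert ij.2 ([] : List (Int × Int × (Int × Int)))) PySem.Dict.empty fil).keys.Nodup := by
    rw [hkeys0]; exact hnd
  have hgetD0 : ∀ j ∈ fil.map Prod.snd,
      (List.foldl (fun d ij => d.insert ij.2 ([] : List (Int × Int × (Int × Int)))) PySem.Dict.empty fil).getD j [] = [] := by
    intro j hj
    obtain ⟨ij, hij, rfl⟩ := List.mem_map.mp hj
    exact PySem.Dict.getD_of_mem_items _ (by rw [hitems0]; exact List.mem_map.mpr ⟨ij, hij, rfl⟩) hnd0 []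
  have hcont : ∀ k ∈ fil.map Prod.snd,
      (List.foldl (fun d ij => d.insert ij.2 ([] : List (Int × Int × (Int × Int)))) PySem.Dict.empty fil).contains k = true := by
    intro k hk
    rw [PySem.Dict.contains_iff_mem_keys, hkeys0]
    exact hk
  obtain ⟨hK, hG⟩ := fold_outer (PySem.List.pyRange 0 ((grid.length : Nat) : Int))
    (PySem.List.pyRange 0 ((((PySem.List.pyGet? grid 0).getD []).length : Nat) : Int))
    (fun r c => (PySem.List.pyGet? ((PySem.List.pyGet? grid r).getD []) c).getD (-1) ≠ -1)
    (fun r c => ((0 : Int), (0 : Int), (r, c)))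
    (fil.map Prod.snd) _ hnd0 hcont hnd
  rw [hkeys1]
  rw [PySem.Dict.items_eq_map_keys _ (by rw [hK, hkeys0]; exact hnd) [], hK, hkeys0]
  have hmm : List.map (fun x : Int × String => (x.2, posTable grid)) fil
      = List.map (fun j => (j, posTable grid)) (List.map Prod.snd fil) := by
    rw [List.map_map]; rfl
  rw [hmm]
  apply List.map_congr_left
  intro j hj
  rw [hG j, if_pos hj, hgetD0 j hj]
  rfl

theorem width_eq (grid : List (List Int)) :
    ((((PySem.List.pyGet? grid 0).getD []).length : Nat) : Int)
      = if grid = [] then 0 else ((grid.headD []).length : Int) := by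
  cases grid <;> simp [PySem.List.pyGet?, PySem.List.pyIdx?]

-- ===== VERDICT (by name: the statement is the Claim_ definition above) =====
theorem pieces_dict_spec : Claim_equal_pieces_dict := by
  intro np grid _ _
  unfold Spec_pieces_dict pieces_dict pieces_dict_alt available_pieces_vars
  rw [foldl_ite_filter, foldl_ite_filter]
  have hnd : (((np.zip pieceNames).filter (fun x => decide (x.1 > 0))).map Prod.snd).Nodup := by
    have h1 : List.Sublist (((np.zip pieceNames).filter (fun x => decide (x.1 > 0))).map Prod.snd)
        ((np.zip pieceNames).map Prod.snd) := (List.filter_sublist).map Prod.snd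
    have h3 : pieceNames.Nodup := by decide
    exact h3.sublist (h1.trans (map_snd_zip_sublist np pieceNames))
  rw [main_items _ hnd grid]
  by_cases hA : ((np.zip pieceNames).filter (fun ij => decide (ij.1 > 0))).map (fun x => x.2) = []
  · have hfil : (np.zip pieceNames).filter (fun ij => decide (ij.1 > 0)) = [] :=
      List.map_eq_nil_iff.mp hA
    simp [hfil]
  · simp only [hA, ← width_eq, if_false]
    rw [List.map_map]
    rfl
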